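-- pv_equiv track=rewrite | github.com/CambrianTech/sentinel-ai | scripts/analyze_output_directories.py | generate_standardized_structure
-- ===== SOURCE A (Python) =====
-- def generate_standardized_structure(output_files, generator_mapping):
--     """Generate a standardized output directory structure."""
--     # Categorize outputs
--     categories = {
--         'pruning': [],
--         'profiling': [],
--         'validation': [],
--         'plasticity': [],
--         'benchmark': [],
--         'demo': [],
--         'other': []
--     }
--
--     for file in output_files:
--         path = file['rel_path']
--
--         # Categorize based on path or directory
--         if 'pruning' in path:
--             categories['pruning'].append(file)
--         elif 'profiling' in path:
--             categories['profiling'].append(file)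
--         elif 'validation' in path:
--             categories['validation'].append(file)
--         elif 'plasticity' in path or 'adaptive' in path:
--             categories['plasticity'].append(file)
--         elif 'benchmark' in path:
--             categories['benchmark'].append(file)
--         elif 'demo' in path:
--             categories['demo'].append(file)
--         else:
--             categories['other'].append(file)
--
--     # Generate proposed structure
--     proposed_structure = {
--         "experiments/results/pruning/": categories['pruning'],
--         "experiments/results/profiling/": categories['profiling'],
--         "experiments/results/validation/": categories['validation'],
--         "experiments/results/plasticity/": categories['plasticity'],
--         "experiments/results/benchmark/": categories['benchmark'],
--         "experiments/results/demo/": categories['demo'],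
--         "experiments/results/other/": categories['other']
--     }
--
--     return proposed_structure
-- ===== SOURCE B (Python) =====
-- RULES = [
--     ('pruning', ('pruning',)),
--     ('profiling', ('profiling',)),
--     ('validation', ('validation',)),
--     ('plasticity', ('plasticity', 'adaptive')),
--     ('benchmark', ('benchmark',)),
--     ('demo', ('demo',)),
-- ]
--
--
-- def _category(path):
--     """First rule (in priority order) whose any keyword occurs in path, else 'other'."""
--     for name, keywords in RULES:
--         if any(k in path for k in keywords):
--             return name
--     return 'other'
--
--
-- def generate_standardized_structure(output_files, generator_mapping):
--     """Generate a standardized output directory structure."""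
--     names = [name for name, _ in RULES] + ['other']
--     return {
--         "experiments/results/%s/" % name:
--             [f for f in output_files if _category(f['rel_path']) == name]
--         for name in names
--     }
-- ===== Notes on version B (the rewrite author's own statement) =====
-- stated objective: idiomatic
-- what changed: Replaces the if-elif cascade appending into a mutable seven-key dict with an ordered rule table and a first-match classifier, building each bucket as a per-category filter in a dict comprehension.
import Mathlib
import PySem

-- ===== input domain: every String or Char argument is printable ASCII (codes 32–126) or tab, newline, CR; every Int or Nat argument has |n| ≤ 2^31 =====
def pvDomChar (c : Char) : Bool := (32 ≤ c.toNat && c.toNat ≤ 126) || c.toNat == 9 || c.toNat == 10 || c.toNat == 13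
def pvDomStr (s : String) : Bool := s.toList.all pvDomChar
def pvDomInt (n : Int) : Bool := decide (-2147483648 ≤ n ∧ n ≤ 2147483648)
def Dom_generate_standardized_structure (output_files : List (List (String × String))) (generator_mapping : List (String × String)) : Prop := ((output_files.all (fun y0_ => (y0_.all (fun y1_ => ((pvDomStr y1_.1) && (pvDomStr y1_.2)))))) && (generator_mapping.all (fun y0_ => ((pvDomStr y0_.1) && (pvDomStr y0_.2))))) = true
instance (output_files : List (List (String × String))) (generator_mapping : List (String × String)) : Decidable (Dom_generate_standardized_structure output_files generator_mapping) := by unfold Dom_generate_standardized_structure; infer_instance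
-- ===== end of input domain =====

-- B replaces A's if-elif cascade appending into a seven-key dict by an ordered rule
-- table with a first-match classifier and one per-category filter per bucket (idiomatic).

-- file['rel_path'] (both Pythons do this lookup; a missing key raises KeyError and is excluded by Pre_)
def pvPath (file : List (String × String)) : String :=
  ((PySem.Dict.mk file).get? "rel_path").getD ""

-- ===== PORT A =====
-- A's 'categories' dict has seven fixed literal string keys; it is modelled as a
-- seven-field record, one field per key, appended to exactly as A appends.
structure CatsA where
  pruning    : List (List (String × String))
  profiling  : List (List (String × String))
  validation : List (List (String × String))
  plasticity : List (List (String × String))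
  benchmark  : List (List (String × String))
  demo       : List (List (String × String))
  other      : List (List (String × String))
deriving Repr, DecidableEq

def pvStepA (c : CatsA) (file : List (String × String)) : CatsA :=
  let path := pvPath file
  if PySem.Str.isIn "pruning" path then { c with pruning := c.pruning ++ [file] }
  else if PySem.Str.isIn "profiling" path then { c with profiling := c.profiling ++ [file] }
  else if PySem.Str.isIn "validation" path then { c with validation := c.validation ++ [file] }
  else if PySem.Str.isIn "plasticity" path || PySem.Str.isIn "adaptive" path then { c with plasticity := c.plasticity ++ [file] }
  else if PySem.Str.isIn "benchmark" path then { c with benchmark := c.benchmark ++ [file] }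
  else if PySem.Str.isIn "demo" path then { c with demo := c.demo ++ [file] }
  else { c with other := c.other ++ [file] }

def generate_standardized_structure (output_files : List (List (String × String))) (generator_mapping : List (String × String)) : List (String × List (List (String × String))) :=
  let categories := output_files.foldl pvStepA ⟨[], [], [], [], [], [], []⟩
  [("experiments/results/pruning/", categories.pruning),
   ("experiments/results/profiling/", categories.profiling),
   ("experiments/results/validation/", categories.validation),
   ("experiments/results/plasticity/", categories.plasticity),
   ("experiments/results/benchmark/", categories.benchmark),
   ("experiments/results/demo/", categories.demo),
   ("experiments/results/other/", categories.other)]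

-- ===== PORT B =====
def pvRules : List (String × List String) :=
  [("pruning", ["pruning"]), ("profiling", ["profiling"]), ("validation", ["validation"]),
   ("plasticity", ["plasticity", "adaptive"]), ("benchmark", ["benchmark"]), ("demo", ["demo"])]

def pvCategory (path : String) : String :=
  match pvRules.find? (fun r => r.2.any (fun k => PySem.Str.isIn k path)) with
  | some r => r.1
  | none => "other"

def generate_standardized_structure_alt (output_files : List (List (String × String))) (generator_mapping : List (String × String)) : List (String × List (List (String × String))) :=
  (pvRules.map Prod.fst ++ ["other"]).map (fun name =>
    ("experiments/results/" ++ name ++ "/",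
     output_files.filter (fun f => pvCategory (pvPath f) == name)))

-- ===== PRECONDITION & SPEC =====
-- Pre_ excludes exactly the inputs where both Pythons raise KeyError: a file dict without a 'rel_path' key.
def Pre_generate_standardized_structure (output_files : List (List (String × String))) (generator_mapping : List (String × String)) : Prop :=
  ∀ file ∈ output_files, "rel_path" ∈ file.map Prod.fst
instance (output_files : List (List (String × String))) (generator_mapping : List (String × String)) : Decidable (Pre_generate_standardized_structure output_files generator_mapping) := by unfold Pre_generate_standardized_structure; infer_instance

def pvWitness_generate_standardized_structure : (List (List (String × String))) × (List (String × String)) :=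
  ([[("rel_path", "output/pruning/run1.json")], [("rel_path", "notes.txt")]], [("a", "b")])

def Spec_generate_standardized_structure (output_files : List (List (String × String))) (generator_mapping : List (String × String)) (out : List (String × List (List (String × String)))) : Prop := out = generate_standardized_structure_alt output_files generator_mapping
instance (output_files : List (List (String × String))) (generator_mapping : List (String × String)) (out : List (String × List (List (String × String)))) : Decidable (Spec_generate_standardized_structure output_files generator_mapping out) := by unfold Spec_generate_standardized_structure; infer_instance

-- ===== CLAIM (what is proved, stated in full; the proofs are below) =====
def Claim_equal_generate_standardized_structure : Prop := ∀ (output_files : List (List (String × String))) (generator_mapping : List (String × String)), Dom_generate_standardized_structure output_files generator_mapping → Pre_generate_standardized_structure output_files generator_mapping → Spec_generate_standardized_structure output_files generator_mapping (generate_standardized_structure output_files generator_mapping)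

-- ===== LEMMAS AND PROOFS =====

-- A's cascade as a single classifier
def pvCatName (path : String) : String :=
  if PySem.Str.isIn "pruning" path then "pruning"
  else if PySem.Str.isIn "profiling" path then "profiling"
  else if PySem.Str.isIn "validation" path then "validation"
  else if PySem.Str.isIn "plasticity" path || PySem.Str.isIn "adaptive" path then "plasticity"
  else if PySem.Str.isIn "benchmark" path then "benchmark"
  else if PySem.Str.isIn "demo" path then "demo"
  else "other"

theorem pvCategory_eq_catName (path : String) : pvCategory path = pvCatName path := by
  unfold pvCategory pvRules pvCatName
  simp [List.find?]
  split_ifs with h1 h2 h3 h4 h5 h6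
  · simp_all
  · simp_all
  · simp_all
  · rcases h4 with h | h <;> simp_all
  · simp_all
  · simp_all
  · simp_all

theorem pvCatName_cases (path : String) :
    pvCatName path = "pruning" ∨ pvCatName path = "profiling" ∨ pvCatName path = "validation" ∨
    pvCatName path = "plasticity" ∨ pvCatName path = "benchmark" ∨ pvCatName path = "demo" ∨
    pvCatName path = "other" := by
  unfold pvCatName; split_ifs <;> simp

theorem catName_pruning (p : String) (h1 : PySem.Str.isIn "pruning" p = true) :
    pvCatName p = "pruning" := by simp_all [pvCatName]

theorem catName_profiling (p : String) (h1 : ¬ PySem.Str.isIn "pruning" p = true)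
    (h2 : PySem.Str.isIn "profiling" p = true) : pvCatName p = "profiling" := by simp_all [pvCatName]

theorem catName_validation (p : String) (h1 : ¬ PySem.Str.isIn "pruning" p = true)
    (h2 : ¬ PySem.Str.isIn "profiling" p = true) (h3 : PySem.Str.isIn "validation" p = true) :
    pvCatName p = "validation" := by simp_all [pvCatName]

theorem catName_plasticity (p : String) (h1 : ¬ PySem.Str.isIn "pruning" p = true)
    (h2 : ¬ PySem.Str.isIn "profiling" p = true) (h3 : ¬ PySem.Str.isIn "validation" p = true)
    (h4 : (PySem.Str.isIn "plasticity" p || PySem.Str.isIn "adaptive" p) = true) :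
    pvCatName p = "plasticity" := by
  rcases Bool.or_eq_true_iff.mp h4 with h | h <;> simp_all [pvCatName]

theorem catName_benchmark (p : String) (h1 : ¬ PySem.Str.isIn "pruning" p = true)
    (h2 : ¬ PySem.Str.isIn "profiling" p = true) (h3 : ¬ PySem.Str.isIn "validation" p = true)
    (h4 : ¬ (PySem.Str.isIn "plasticity" p || PySem.Str.isIn "adaptive" p) = true)
    (h5 : PySem.Str.isIn "benchmark" p = true) : pvCatName p = "benchmark" := by
  rcases Bool.or_eq_false_iff.mp (Bool.not_eq_true _ |>.mp h4) with ⟨ha, hb⟩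
  simp_all [pvCatName]

theorem catName_demo (p : String) (h1 : ¬ PySem.Str.isIn "pruning" p = true)
    (h2 : ¬ PySem.Str.isIn "profiling" p = true) (h3 : ¬ PySem.Str.isIn "validation" p = true)
    (h4 : ¬ (PySem.Str.isIn "plasticity" p || PySem.Str.isIn "adaptive" p) = true)
    (h5 : ¬ PySem.Str.isIn "benchmark" p = true) (h6 : PySem.Str.isIn "demo" p = true) :
    pvCatName p = "demo" := by
  rcases Bool.or_eq_false_iff.mp (Bool.not_eq_true _ |>.mp h4) with ⟨ha, hb⟩
  simp_all [pvCatName]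

theorem catName_other (p : String) (h1 : ¬ PySem.Str.isIn "pruning" p = true)
    (h2 : ¬ PySem.Str.isIn "profiling" p = true) (h3 : ¬ PySem.Str.isIn "validation" p = true)
    (h4 : ¬ (PySem.Str.isIn "plasticity" p || PySem.Str.isIn "adaptive" p) = true)
    (h5 : ¬ PySem.Str.isIn "benchmark" p = true) (h6 : ¬ PySem.Str.isIn "demo" p = true) :
    pvCatName p = "other" := by
  rcases Bool.or_eq_false_iff.mp (Bool.not_eq_true _ |>.mp h4) with ⟨ha, hb⟩
  simp_all [pvCatName]

theorem stepA_eq_catName (c : CatsA) (f : List (String × String)) :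
    pvStepA c f =
      if pvCatName (pvPath f) == "pruning" then { c with pruning := c.pruning ++ [f] }
      else if pvCatName (pvPath f) == "profiling" then { c with profiling := c.profiling ++ [f] }
      else if pvCatName (pvPath f) == "validation" then { c with validation := c.validation ++ [f] }
      else if pvCatName (pvPath f) == "plasticity" then { c with plasticity := c.plasticity ++ [f] }
      else if pvCatName (pvPath f) == "benchmark" then { c with benchmark := c.benchmark ++ [f] }
      else if pvCatName (pvPath f) == "demo" then { c with demo := c.demo ++ [f] }
      else { c with other := c.other ++ [f] } := by
  unfold pvStepA
  by_cases h1 : PySem.Str.isIn "pruning" (pvPath f) = true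
  · rw [catName_pruning _ h1]; simp_all
  · by_cases h2 : PySem.Str.isIn "profiling" (pvPath f) = true
    · rw [catName_profiling _ h1 h2]; simp_all
    · by_cases h3 : PySem.Str.isIn "validation" (pvPath f) = true
      · rw [catName_validation _ h1 h2 h3]; simp_all
      · by_cases h4 : (PySem.Str.isIn "plasticity" (pvPath f) || PySem.Str.isIn "adaptive" (pvPath f)) = true
        · rw [catName_plasticity _ h1 h2 h3 h4]; simp_all
        · by_cases h5 : PySem.Str.isIn "benchmark" (pvPath f) = true
          · rw [catName_benchmark _ h1 h2 h3 h4 h5]; simp_all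
          · by_cases h6 : PySem.Str.isIn "demo" (pvPath f) = true
            · rw [catName_demo _ h1 h2 h3 h4 h5 h6]; simp_all
            · rw [catName_other _ h1 h2 h3 h4 h5 h6]; simp_all

theorem foldA_eq_filters (files : List (List (String × String))) (c : CatsA) :
    files.foldl pvStepA c =
      ⟨c.pruning ++ files.filter (fun f => pvCatName (pvPath f) == "pruning"),
       c.profiling ++ files.filter (fun f => pvCatName (pvPath f) == "profiling"),
       c.validation ++ files.filter (fun f => pvCatName (pvPath f) == "validation"),
       c.plasticity ++ files.filter (fun f => pvCatName (pvPath f) == "plasticity"),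
       c.benchmark ++ files.filter (fun f => pvCatName (pvPath f) == "benchmark"),
       c.demo ++ files.filter (fun f => pvCatName (pvPath f) == "demo"),
       c.other ++ files.filter (fun f => pvCatName (pvPath f) == "other")⟩ := by
  induction files generalizing c with
  | nil => cases c; simp
  | cons f fs ih =>
    rw [List.foldl_cons, stepA_eq_catName, ih]
    cases c
    rcases pvCatName_cases (pvPath f) with h | h | h | h | h | h | h <;>
      simp [h]

-- ===== VERDICT (by name: the statement is the Claim_ definition above) =====
theorem generate_standardized_structure_spec : Claim_equal_generate_standardized_structure := by
  intro output_files generator_mapping _ _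
  unfold Spec_generate_standardized_structure
  simp only [generate_standardized_structure, generate_standardized_structure_alt,
    foldA_eq_filters, pvCategory_eq_catName, pvRules, List.map, List.cons_append]
  rfl
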